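-- pv_equiv track=rewrite | github.com/donga-it-club/2024-algorithm-study | 정민석/프로그래머스/week04_greedy/체육복.py | solution
-- ===== SOURCE A (Python) =====
-- def solution(n, lost, reserve):
--     _reserve = [r for r in reserve if r not in lost]
--     _lost = [l for l in lost if l not in reserve]
--
--     _lost.sort()
--     _reserve.sort()
--
--     for r in _reserve:
--         front = r - 1
--         back = r + 1
--         if front in _lost:
--             _lost.remove(front)
--         elif back in _lost:
--             _lost.remove(back)
--     return n - len(_lost)
-- ===== SOURCE B (Python) =====
-- def solution(n, lost, reserve):
--     # two-pointer merge over the two sorted, mutually-exclusive lists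
--     L = sorted(x for x in lost if x not in reserve)
--     R = sorted(x for x in reserve if x not in lost)
--     i = j = matched = 0
--     while i < len(L) and j < len(R):
--         d = L[i] - R[j]
--         if -1 <= d <= 1:
--             matched += 1
--             i += 1
--             j += 1
--         elif d < 0:
--             i += 1
--         else:
--             j += 1
--     return n - (len(L) - matched)
-- ===== Notes on version B (the rewrite author's own statement) =====
-- stated objective: alternative
-- what changed: A's per-reserve loop with repeated 'in' scans and list.remove on the mutable _lost list is replaced by a single two-pointer merge over the two sorted mutually-filtered lists that counts matches; proved to give the same count despite the opposite lend-direction tie-breaking.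
import Mathlib
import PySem

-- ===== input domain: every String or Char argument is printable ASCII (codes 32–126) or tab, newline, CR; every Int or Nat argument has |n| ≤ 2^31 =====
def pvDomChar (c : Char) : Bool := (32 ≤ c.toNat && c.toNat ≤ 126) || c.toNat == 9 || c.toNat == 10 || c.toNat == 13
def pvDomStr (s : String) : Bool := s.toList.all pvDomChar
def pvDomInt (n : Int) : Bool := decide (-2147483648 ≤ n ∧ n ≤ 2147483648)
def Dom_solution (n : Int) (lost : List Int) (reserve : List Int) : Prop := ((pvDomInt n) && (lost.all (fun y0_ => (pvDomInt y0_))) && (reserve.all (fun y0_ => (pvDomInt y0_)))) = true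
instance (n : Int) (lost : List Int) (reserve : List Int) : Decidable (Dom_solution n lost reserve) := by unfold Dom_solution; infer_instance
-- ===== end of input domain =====

-- B replaces A's loop over reserve with its inner list scans (`in` test + list.remove)
-- by a single two-pointer merge over the two sorted lists; same return value, alternative algorithm.

-- ===== PORT A =====
-- A's for-loop over _reserve, state = the mutable _lost list; `in` tests and
-- list.remove(first occurrence) become membership tests and List.erase.
def loopA : List Int → List Int → List Int
  | L, [] => L
  | L, r :: R =>
    if (r - 1) ∈ L then loopA (L.erase (r - 1)) R
    else if (r + 1) ∈ L then loopA (L.erase (r + 1)) R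
    else loopA L R

def solution (n : Int) (lost : List Int) (reserve : List Int) : Int :=
  let _reserve := reserve.filter (fun r => decide (r ∉ lost))
  let _lost := lost.filter (fun l => decide (l ∉ reserve))
  let _lost2 := PySem.List.sorted _lost (fun x => x) false
  let _reserve2 := PySem.List.sorted _reserve (fun x => x) false
  n - ((loopA _lost2 _reserve2).length : Int)

-- ===== PORT B =====
-- B's while loop with indices i, j, matched: ported as recursion on the two
-- suffixes L.drop i / R.drop j with the matched accumulator.
def tpB : List Int → List Int → Int → Int
  | l :: L, r :: R, m =>
    if -1 ≤ l - r ∧ l - r ≤ 1 then tpB L R (m + 1)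
    else if l - r < 0 then tpB L (r :: R) m
    else tpB (l :: L) R m
  | _, _, m => m
  termination_by L R _ => L.length + R.length

def solution_alt (n : Int) (lost : List Int) (reserve : List Int) : Int :=
  let L := PySem.List.sorted (lost.filter (fun x => decide (x ∉ reserve))) (fun x => x) false
  let R := PySem.List.sorted (reserve.filter (fun x => decide (x ∉ lost))) (fun x => x) false
  n - ((L.length : Int) - tpB L R 0)

-- ===== PRECONDITION & SPEC =====
def Spec_solution (n : Int) (lost : List Int) (reserve : List Int) (out : Int) : Prop := out = solution_alt n lost reserve
instance (n : Int) (lost : List Int) (reserve : List Int) (out : Int) : Decidable (Spec_solution n lost reserve out) := by unfold Spec_solution; infer_instance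

-- ===== CLAIM (what is proved, stated in full; the proofs are below) =====
def Claim_equal_solution : Prop := ∀ (n : Int) (lost : List Int) (reserve : List Int), Dom_solution n lost reserve → Spec_solution n lost reserve (solution n lost reserve)

-- ===== LEMMAS AND PROOFS =====

lemma loopA_nil (R : List Int) : loopA [] R = [] := by
  induction R with
  | nil => rfl
  | cons r R ih => simp [loopA, ih]

lemma not_mem_of_lt_head (l v : Int) (L : List Int)
    (h : (l :: L).Pairwise (· ≤ ·)) (hv : v < l) : v ∉ l :: L := by
  intro hmem
  rcases List.mem_cons.mp hmem with h1 | h1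
  · omega
  · have := (List.pairwise_cons.mp h).1 v h1
    omega

lemma loopA_cons_small (l : Int) (L R : List Int)
    (hall : ∀ r ∈ R, l + 1 < r) :
    loopA (l :: L) R = l :: loopA L R := by
  induction R generalizing L with
  | nil => rfl
  | cons r R ih =>
    have hr := hall r (List.mem_cons_self ..)
    have h1 : r - 1 ≠ l := by omega
    have h2 : r + 1 ≠ l := by omega
    have e1 : (l :: L).erase (r - 1) = l :: L.erase (r - 1) :=
      List.erase_cons_tail (by simpa using fun h => h1 h.symm)
    have e2 : (l :: L).erase (r + 1) = l :: L.erase (r + 1) :=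
      List.erase_cons_tail (by simpa using fun h => h2 h.symm)
    have m1 : ((r - 1) ∈ l :: L) ↔ ((r - 1) ∈ L) := by
      simp [List.mem_cons, h1]
    have m2 : ((r + 1) ∈ l :: L) ↔ ((r + 1) ∈ L) := by
      simp [List.mem_cons, h2]
    have hall' : ∀ r' ∈ R, l + 1 < r' := fun r' hr' => hall r' (List.mem_cons_of_mem _ hr')
    by_cases c1 : (r - 1) ∈ L
    · simp [loopA, m1.mpr c1, c1, e1, ih _ hall']
    · by_cases c2 : (r + 1) ∈ L
      · simp [loopA, m1, c1, m2.mpr c2, c2, e2, ih _ hall']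
      · simp [loopA, m1, c1, m2, c2, ih _ hall']

lemma key_lemma : ∀ (N : ℕ) (L R : List Int), L.length + R.length ≤ N →
    L.Pairwise (· ≤ ·) → R.Pairwise (· ≤ ·) → (∀ x ∈ L, x ∉ R) → ∀ (m : Int),
    ((loopA L R).length : Int) + tpB L R m = (L.length : Int) + m := by
  intro N
  induction N with
  | zero =>
    intro L R hlen _ _ _ m
    have hL : L = [] := List.eq_nil_of_length_eq_zero (by omega)
    have hR : R = [] := List.eq_nil_of_length_eq_zero (by omega)
    subst hL; subst hR; simp [loopA, tpB]
  | succ N ih =>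
    intro L R hlen hL hR hd m
    match L, R with
    | [], R => simp [loopA_nil, tpB]
    | l :: L', [] => simp [loopA, tpB]
    | l :: L', r :: R' =>
      have hLp := List.pairwise_cons.mp hL
      have hRp := List.pairwise_cons.mp hR
      have hlr : l ≠ r := by
        intro h; exact hd l (List.mem_cons_self ..) (h ▸ List.mem_cons_self ..)
      by_cases c1 : l - r ≤ -2
      · -- l too small to ever be matched: it survives A's whole loop; B advances i
        have hall : ∀ r' ∈ r :: R', l + 1 < r' := by
          intro r' hr'
          rcases List.mem_cons.mp hr' with h | h
          · omega
          · have := hRp.1 r' h; omega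
        have hA := loopA_cons_small l L' (r :: R') hall
        have htp : tpB (l :: L') (r :: R') m = tpB L' (r :: R') m := by
          rw [tpB]; rw [if_neg (by omega), if_pos (by omega)]
        have := ih L' (r :: R') (by simp at hlen ⊢; omega) hLp.2 hR
          (fun x hx => hd x (List.mem_cons_of_mem _ hx)) m
        rw [hA, htp]
        simp only [List.length_cons] at this ⊢
        push_cast at this ⊢
        omega
      · by_cases c2 : l - r = -1
        · -- l = r - 1: A removes l via front, B matches
          have hmem : (r - 1) ∈ l :: L' := by
            have : r - 1 = l := by omega
            simp [this]
          have he : (l :: L').erase (r - 1) = L' := by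
            have : r - 1 = l := by omega
            simp [this]
          have hA : loopA (l :: L') (r :: R') = loopA L' R' := by
            rw [loopA, if_pos hmem, he]
          have htp : tpB (l :: L') (r :: R') m = tpB L' R' (m + 1) := by
            rw [tpB]; rw [if_pos (by omega)]
          have := ih L' R' (by simp at hlen ⊢; omega) hLp.2 hRp.2
            (fun x hx => fun hxr => hd x (List.mem_cons_of_mem _ hx) (List.mem_cons_of_mem _ hxr)) (m + 1)
          rw [hA, htp, this]; simp only [List.length_cons]; push_cast; omega
        · by_cases c3 : l - r = 1
          · -- l = r + 1: A removes l via back, B matches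
            have hnf : (r - 1) ∉ l :: L' :=
              not_mem_of_lt_head l (r - 1) L' hL (by omega)
            have hmem : (r + 1) ∈ l :: L' := by
              have : r + 1 = l := by omega
              simp [this]
            have he : (l :: L').erase (r + 1) = L' := by
              have : r + 1 = l := by omega
              simp [this]
            have hA : loopA (l :: L') (r :: R') = loopA L' R' := by
              rw [loopA, if_neg hnf, if_pos hmem, he]
            have htp : tpB (l :: L') (r :: R') m = tpB L' R' (m + 1) := by
              rw [tpB]; rw [if_pos (by omega)]
            have := ih L' R' (by simp at hlen ⊢; omega) hLp.2 hRp.2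
              (fun x hx => fun hxr => hd x (List.mem_cons_of_mem _ hx) (List.mem_cons_of_mem _ hxr)) (m + 1)
            rw [hA, htp, this]; simp only [List.length_cons]; push_cast; omega
          · -- l ≥ r + 2 (l = r excluded by disjointness): r matches nothing; both drop r
            have hge : l - r ≥ 2 := by
              rcases lt_trichotomy l r with h | h | h
              · omega
              · exact absurd h hlr
              · omega
            have hnf : (r - 1) ∉ l :: L' :=
              not_mem_of_lt_head l (r - 1) L' hL (by omega)
            have hnb : (r + 1) ∉ l :: L' :=
              not_mem_of_lt_head l (r + 1) L' hL (by omega)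
            have hA : loopA (l :: L') (r :: R') = loopA (l :: L') R' := by
              rw [loopA, if_neg hnf, if_neg hnb]
            have htp : tpB (l :: L') (r :: R') m = tpB (l :: L') R' m := by
              rw [tpB]; rw [if_neg (by omega), if_neg (by omega)]
            have := ih (l :: L') R' (by simp at hlen ⊢; omega)
              hL hRp.2
              (fun x hx hxr => hd x hx (List.mem_cons_of_mem _ hxr)) m
            rw [hA, htp, this]

-- ===== VERDICT (by name: the statement is the Claim_ definition above) =====
theorem solution_spec : Claim_equal_solution := by
  intro n lost reserve _
  unfold Spec_solution solution solution_alt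
  dsimp only
  generalize hLd : PySem.List.sorted (List.filter (fun x => decide (x ∉ reserve)) lost) (fun x => x) false = L
  generalize hRd : PySem.List.sorted (List.filter (fun x => decide (x ∉ lost)) reserve) (fun x => x) false = R
  have hL : L.Pairwise (· ≤ ·) := by
    rw [← hLd]
    exact PySem.List.sorted_pairwise (lost.filter (fun x => decide (x ∉ reserve))) (fun x => x)
  have hR : R.Pairwise (· ≤ ·) := by
    rw [← hRd]
    exact PySem.List.sorted_pairwise (reserve.filter (fun x => decide (x ∉ lost))) (fun x => x)
  have hd : ∀ x ∈ L, x ∉ R := by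
    intro x hx hxR
    rw [← hLd] at hx
    rw [← hRd] at hxR
    have h1 := (PySem.List.mem_sorted ..).mp hx
    have h2 := (PySem.List.mem_sorted ..).mp hxR
    have := (List.mem_filter.mp h1).2
    have := (List.mem_filter.mp h2).1
    simp_all
  have hk := key_lemma (L.length + R.length) L R le_rfl hL hR hd 0
  omega
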